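-- pv_equiv track=rewrite | github.com/JoJaJones/Advent-of-Code | aoc2019/Day9/day_solution.py | calc_rel_prime_pos
-- ===== SOURCE A (Python) =====
-- def calc_rel_prime_pos(r, c):
--     min_val = min(abs(r), abs(c))
--     if min_val == 0:
--         if r != 0:
--             r //= abs(r)
--
--         if c != 0:
--             c //= abs(c)
--
--         return r, c
--
--     i = 2
--     while i <= min_val:
--         while r % i == 0 and c % i == 0:
--             r //= i
--             c //= i
--             min_val //= i
--         i += 1
--
--
--
--     return r, c
-- ===== SOURCE B (Python) =====
-- import math
--
-- def calc_rel_prime_pos(r, c):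
--     g = math.gcd(r, c)
--     if g == 0:
--         return r, c
--     return r // g, c // g
-- ===== Notes on version B (the rewrite author's own statement) =====
-- stated objective: faster
-- what changed: Trial division of every i from 2 up to min(|r|,|c|) is replaced by a single math.gcd call followed by two exact divisions.
import Mathlib
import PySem

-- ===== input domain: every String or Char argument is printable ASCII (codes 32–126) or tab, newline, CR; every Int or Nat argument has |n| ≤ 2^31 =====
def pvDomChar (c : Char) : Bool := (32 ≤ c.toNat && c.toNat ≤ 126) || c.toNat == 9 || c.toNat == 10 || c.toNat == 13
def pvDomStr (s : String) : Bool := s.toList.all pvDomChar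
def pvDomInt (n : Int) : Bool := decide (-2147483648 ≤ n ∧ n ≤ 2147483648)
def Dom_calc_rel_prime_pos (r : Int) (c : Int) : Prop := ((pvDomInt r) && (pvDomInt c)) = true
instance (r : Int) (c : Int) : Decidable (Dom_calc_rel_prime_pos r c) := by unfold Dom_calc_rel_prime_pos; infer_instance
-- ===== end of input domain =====

-- B replaces A's trial division of every i from 2 up to min(|r|,|c|) by a single gcd
-- computation followed by two exact divisions (objective: faster).

-- ===== PORT A =====
-- inner 'while r % i == 0 and c % i == 0' loop over the state (r, c, min_val).
-- 'fuel' is a totality guard only: the callers pass enough fuel that it never runs out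
-- on a state the Python loop reaches (each division shrinks the nonzero |r|).
def pvInnerA (fuel : Nat) (i r c m : Int) : Int × Int × Int :=
  match fuel with
  | 0 => (r, c, m)
  | f + 1 =>
    if PySem.Int.mod r i = 0 ∧ PySem.Int.mod c i = 0 then
      pvInnerA f i (PySem.Int.floordiv r i) (PySem.Int.floordiv c i) (PySem.Int.floordiv m i)
    else (r, c, m)

-- outer 'while i <= min_val' loop; again fuel is a totality guard only (min_val only
-- shrinks, so min_val steps of i suffice from i = 2)
def pvOuterA (fuel : Nat) (i r c m : Int) : Int × Int :=
  match fuel with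
  | 0 => (r, c)
  | f + 1 =>
    if i ≤ m then
      pvOuterA f (i + 1) (pvInnerA r.natAbs i r c m).1 (pvInnerA r.natAbs i r c m).2.1
        (pvInnerA r.natAbs i r c m).2.2
    else (r, c)

def calc_rel_prime_pos (r : Int) (c : Int) : List Int :=
  if min |r| |c| = 0 then
    [(if r ≠ 0 then PySem.Int.floordiv r |r| else r),
     (if c ≠ 0 then PySem.Int.floordiv c |c| else c)]
  else
    [(pvOuterA (min |r| |c|).toNat 2 r c (min |r| |c|)).1,
     (pvOuterA (min |r| |c|).toNat 2 r c (min |r| |c|)).2]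

-- ===== PORT B =====
def calc_rel_prime_pos_alt (r : Int) (c : Int) : List Int :=
  if (Int.gcd r c : Int) = 0 then [r, c]
  else [PySem.Int.floordiv r (Int.gcd r c), PySem.Int.floordiv c (Int.gcd r c)]

-- ===== PRECONDITION & SPEC =====
def Spec_calc_rel_prime_pos (r : Int) (c : Int) (out : List Int) : Prop := out = calc_rel_prime_pos_alt r c
instance (r : Int) (c : Int) (out : List Int) : Decidable (Spec_calc_rel_prime_pos r c out) := by unfold Spec_calc_rel_prime_pos; infer_instance

-- ===== CLAIM (what is proved, stated in full; the proofs are below) =====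
def Claim_equal_calc_rel_prime_pos : Prop := ∀ (r : Int) (c : Int), Dom_calc_rel_prime_pos r c → Spec_calc_rel_prime_pos r c (calc_rel_prime_pos r c)

-- ===== LEMMAS AND PROOFS =====

-- bound on the min_val component of the inner loop's result
theorem pvInnerA_m_le (fuel : Nat) (i : Int) (hi : 2 ≤ i) :
    ∀ r c m : Int, 0 ≤ m → 0 ≤ (pvInnerA fuel i r c m).2.2 ∧ (pvInnerA fuel i r c m).2.2 ≤ m := by
  induction fuel with
  | zero => intro r c m hm; exact ⟨hm, le_rfl⟩
  | succ f ih =>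
    intro r c m hm
    rw [pvInnerA]
    split_ifs with h
    · have hpos : (0:Int) < i := by omega
      have h1 : 0 ≤ PySem.Int.floordiv m i := by
        rw [PySem.Int.floordiv_eq_ediv_of_pos hpos]; exact Int.ediv_nonneg hm (le_of_lt hpos)
      obtain ⟨ha, hb⟩ := ih _ _ _ h1
      refine ⟨ha, le_trans hb ?_⟩
      rw [PySem.Int.floordiv_eq_ediv_of_pos hpos]
      exact Int.ediv_le_self _ hm
    · exact ⟨hm, le_rfl⟩

-- the inner loop divides out a common factor d and leaves no common factor i
theorem pvInnerA_spec (i : Int) (hi : 2 ≤ i) :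
    ∀ (fuel : Nat) (r c m : Int), r ≠ 0 → c ≠ 0 → m = min |r| |c| → r.natAbs ≤ fuel →
    ∃ d : Int, 0 < d ∧ r = (pvInnerA fuel i r c m).1 * d ∧ c = (pvInnerA fuel i r c m).2.1 * d ∧
      (pvInnerA fuel i r c m).1 ≠ 0 ∧ (pvInnerA fuel i r c m).2.1 ≠ 0 ∧
      (pvInnerA fuel i r c m).2.2 = min |(pvInnerA fuel i r c m).1| |(pvInnerA fuel i r c m).2.1| ∧
      ¬(i ∣ (pvInnerA fuel i r c m).1 ∧ i ∣ (pvInnerA fuel i r c m).2.1) := by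
  intro fuel
  induction fuel with
  | zero =>
    intro r c m hr hc hm hfuel
    exact absurd (Int.natAbs_eq_zero.mp (Nat.le_zero.mp hfuel)) hr
  | succ f ih =>
    intro r c m hr hc hm hfuel
    rw [pvInnerA]
    split_ifs with h
    · obtain ⟨h1, h2⟩ := h
      have hpos : (0:Int) < i := by omega
      rw [PySem.Int.mod_eq_emod_of_pos hpos] at h1 h2
      obtain ⟨a, ha⟩ := Int.dvd_of_emod_eq_zero h1
      obtain ⟨b, hb⟩ := Int.dvd_of_emod_eq_zero h2
      have hfa : PySem.Int.floordiv r i = a := by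
        rw [PySem.Int.floordiv_eq_ediv_of_pos hpos, ha, Int.mul_ediv_cancel_left _ (by omega)]
      have hfb : PySem.Int.floordiv c i = b := by
        rw [PySem.Int.floordiv_eq_ediv_of_pos hpos, hb, Int.mul_ediv_cancel_left _ (by omega)]
      have ha0 : a ≠ 0 := by rintro rfl; simp at ha; exact hr ha
      have hb0 : b ≠ 0 := by rintro rfl; simp at hb; exact hc hb
      have key : min |i * a| |i * b| = |i| * min |a| |b| := by
        rw [abs_mul, abs_mul]
        rcases le_total |a| |b| with hab | hab
        · rw [min_eq_left hab, min_eq_left (mul_le_mul_of_nonneg_left hab (abs_nonneg i))]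
        · rw [min_eq_right hab, min_eq_right (mul_le_mul_of_nonneg_left hab (abs_nonneg i))]
      have hfm : PySem.Int.floordiv m i = min |a| |b| := by
        rw [PySem.Int.floordiv_eq_ediv_of_pos hpos, hm, ha, hb, key, abs_of_pos hpos,
          Int.mul_ediv_cancel_left _ (by omega)]
      have hafuel : a.natAbs ≤ f := by
        have h4 := Int.natAbs_mul i a
        have h2' : 2 ≤ i.natAbs := by omega
        have h3 : 1 ≤ a.natAbs := Int.natAbs_pos.mpr ha0
        have h5 : 2 * a.natAbs ≤ i.natAbs * a.natAbs := Nat.mul_le_mul_right _ h2'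
        have h6 : r.natAbs = i.natAbs * a.natAbs := by rw [ha, Int.natAbs_mul]
        omega
      rw [hfa, hfb, hfm]
      set u2 := pvInnerA f i a b (min |a| |b|) with hu2
      obtain ⟨d, hd, h3, h4, h5⟩ := ih a b (min |a| |b|) ha0 hb0 rfl hafuel
      refine ⟨d * i, by positivity, ?_, ?_, h5⟩
      · rw [ha, h3]; ring
      · rw [hb, h4]; ring
    · refine ⟨1, one_pos, by ring, by ring, hr, hc, hm, ?_⟩
      rintro ⟨⟨a, ha⟩, ⟨b, hb⟩⟩
      have hpos : (0:Int) < i := by omega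
      have ha' : r = i * a := ha
      have hb' : c = i * b := hb
      exact h ⟨by rw [PySem.Int.mod_eq_emod_of_pos hpos, ha']; exact Int.mul_emod_right _ _,
               by rw [PySem.Int.mod_eq_emod_of_pos hpos, hb']; exact Int.mul_emod_right _ _⟩

-- once every candidate factor up to min(|r|,|c|) has been tried, the pair is coprime
theorem pv_gcd_one (i r c m : Int) (hr : r ≠ 0) (hc : c ≠ 0) (hm : m = min |r| |c|)
    (him : m < i) (hinv : ∀ d : Int, 2 ≤ d → d < i → ¬(d ∣ r ∧ d ∣ c)) :
    Int.gcd r c = 1 := by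
  by_contra hne
  have hg0 : Int.gcd r c ≠ 0 := fun hz => hr (Int.gcd_eq_zero_iff.mp hz).1
  have hg2 : 2 ≤ (Int.gcd r c : Int) := by
    have : 2 ≤ Int.gcd r c := by omega
    exact_mod_cast this
  have hle : (Int.gcd r c : Int) ≤ m := by
    rw [hm]
    have l1 : (Int.gcd r c : Int) ≤ |r| :=
      Int.le_of_dvd (abs_pos.mpr hr) ((dvd_abs _ _).mpr (Int.gcd_dvd_left r c))
    have l2 : (Int.gcd r c : Int) ≤ |c| :=
      Int.le_of_dvd (abs_pos.mpr hc) ((dvd_abs _ _).mpr (Int.gcd_dvd_right r c))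
    exact le_min l1 l2
  exact hinv _ hg2 (by omega) ⟨Int.gcd_dvd_left r c, Int.gcd_dvd_right r c⟩

-- the outer loop computes (r / gcd, c / gcd) once no common factor below i remains
theorem pvOuterA_spec :
    ∀ (fuel : Nat) (i r c m : Int), 2 ≤ i → r ≠ 0 → c ≠ 0 → m = min |r| |c| →
    (m + 1 - i).toNat ≤ fuel →
    (∀ d : Int, 2 ≤ d → d < i → ¬(d ∣ r ∧ d ∣ c)) →
    pvOuterA fuel i r c m =
      (PySem.Int.floordiv r (Int.gcd r c), PySem.Int.floordiv c (Int.gcd r c)) := by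
  intro fuel
  induction fuel with
  | zero =>
    intro i r c m hi hr hc hm hfuel hinv
    have him : m < i := by omega
    rw [pvOuterA, pv_gcd_one i r c m hr hc hm him hinv]
    norm_num [PySem.Int.floordiv_eq_ediv_of_pos (show (0:Int) < 1 by norm_num)]
  | succ f ih =>
    intro i r c m hi hr hc hm hfuel hinv
    rw [pvOuterA]
    split_ifs with h1
    · obtain ⟨d, hd, hrd, hcd, hr', hc', hm', hnd⟩ :=
        pvInnerA_spec i hi r.natAbs r c m hr hc hm le_rfl
      set u := pvInnerA r.natAbs i r c m with hu
      have hinv' : ∀ e : Int, 2 ≤ e → e < i + 1 → ¬(e ∣ u.1 ∧ e ∣ u.2.1) := by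
        intro e he1 he2 ⟨hea, heb⟩
        rcases lt_or_eq_of_le (by omega : e ≤ i) with hlt | rfl
        · exact hinv e he1 hlt ⟨hrd ▸ hea.mul_right d, hcd ▸ heb.mul_right d⟩
        · exact hnd ⟨hea, heb⟩
      have hmle : u.2.2 ≤ m := (pvInnerA_m_le r.natAbs i hi r c m (by omega)).2
      have hfuel' : (u.2.2 + 1 - (i + 1)).toNat ≤ f := by omega
      rw [ih (i + 1) u.1 u.2.1 u.2.2 (by omega) hr' hc' hm' hfuel' hinv']
      set g : Int := (Int.gcd u.1 u.2.1 : Int) with hgdef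
      have hgcd : (Int.gcd r c : Int) = g * d := by
        rw [hrd, hcd, Int.gcd_mul_right, hgdef]
        push_cast
        rw [abs_of_pos hd]
      obtain ⟨p, hp⟩ := Int.gcd_dvd_left u.1 u.2.1
      obtain ⟨q, hq⟩ := Int.gcd_dvd_right u.1 u.2.1
      have hg0 : (0:Int) < g := by
        have := Int.gcd_pos_of_ne_zero_left u.2.1 hr'
        rw [hgdef]; exact_mod_cast this
      have e1 : PySem.Int.floordiv u.1 g = p := by
        rw [PySem.Int.floordiv_eq_ediv_of_pos hg0, hp, Int.mul_ediv_cancel_left _ (by omega)]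
      have e2 : PySem.Int.floordiv u.2.1 g = q := by
        rw [PySem.Int.floordiv_eq_ediv_of_pos hg0, hq, Int.mul_ediv_cancel_left _ (by omega)]
      have hgd : (0:Int) < g * d := by positivity
      have e3 : PySem.Int.floordiv r (Int.gcd r c) = p := by
        rw [hgcd, PySem.Int.floordiv_eq_ediv_of_pos hgd, hrd, hp, mul_right_comm g p d,
          Int.mul_ediv_cancel_left _ (by positivity)]
      have e4 : PySem.Int.floordiv c (Int.gcd r c) = q := by
        rw [hgcd, PySem.Int.floordiv_eq_ediv_of_pos hgd, hcd, hq, mul_right_comm g q d,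
          Int.mul_ediv_cancel_left _ (by positivity)]
      rw [e1, e2, e3, e4]
    · have him : m < i := by omega
      rw [pv_gcd_one i r c m hr hc hm him hinv]
      norm_num [PySem.Int.floordiv_eq_ediv_of_pos (show (0:Int) < 1 by norm_num)]

-- ===== VERDICT (by name: the statement is the Claim_ definition above) =====
theorem calc_rel_prime_pos_spec : Claim_equal_calc_rel_prime_pos := by
  unfold Claim_equal_calc_rel_prime_pos Spec_calc_rel_prime_pos
  intro r c _
  unfold calc_rel_prime_pos calc_rel_prime_pos_alt
  by_cases hr : r = 0
  · subst hr
    by_cases hc : c = 0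
    · subst hc; norm_num
    · have habs : (0:Int) < |c| := abs_pos.mpr hc
      have hg : ((Int.gcd 0 c : Int)) = |c| := by
        rw [Int.gcd_zero_left, Int.natCast_natAbs]
      rw [if_pos (by simp : min |(0:Int)| |c| = 0), hg, if_neg (by omega : ¬ |c| = (0:Int)),
        if_neg (by simp : ¬ (0:Int) ≠ 0), if_pos hc]
      simp [PySem.Int.floordiv_eq_ediv_of_pos habs]
  · by_cases hc : c = 0
    · subst hc
      have habs : (0:Int) < |r| := abs_pos.mpr hr
      have hg : ((Int.gcd r 0 : Int)) = |r| := by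
        rw [Int.gcd_zero_right, Int.natCast_natAbs]
      rw [if_pos (by simp : min |r| |(0:Int)| = 0), hg, if_neg (by omega : ¬ |r| = (0:Int)),
        if_pos hr, if_neg (by simp : ¬ (0:Int) ≠ 0)]
      simp [PySem.Int.floordiv_eq_ediv_of_pos habs]
    · have hm1 : (1:Int) ≤ min |r| |c| := by
        have := abs_pos.mpr hr; have := abs_pos.mpr hc
        omega
      have hmin : ¬ min |r| |c| = (0:Int) := by omega
      have hg0 : Int.gcd r c ≠ 0 := fun hz => hr (Int.gcd_eq_zero_iff.mp hz).1
      rw [if_neg hmin]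
      rw [if_neg (by exact_mod_cast hg0 : ¬ (Int.gcd r c : Int) = 0)]
      rw [pvOuterA_spec (min |r| |c|).toNat 2 r c (min |r| |c|) (le_refl 2) hr hc rfl
        (by omega) (by intro d hd1 hd2 hdd; omega)]
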